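-- pv_equiv track=rewrite | github.com/Kawser-nerd/CLCDSA | Source Codes/CodeJamData/14/04/17.py | scoreDeceit
-- ===== SOURCE A (Python) =====
-- def scoreDeceit(naomiNums, kenNums):
--     naomiInd = 0
--     kenInd = 0
--     while kenInd < len(kenNums):
--         kenPlay = kenNums[kenInd]
--         while naomiInd < len(naomiNums) and naomiNums[naomiInd] < kenPlay:
--             naomiInd += 1
--         if naomiInd == len(naomiNums):
--             break
--         naomiInd += 1
--         kenInd += 1
--     return kenInd
-- ===== SOURCE B (Python) =====
-- def scoreDeceit(naomiNums, kenNums):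
--     # Binary search for the longest prefix of kenNums that can be beaten by
--     # (greedily matched against) naomiNums, checking feasibility of each
--     # candidate prefix with a backward greedy pass over both lists.
--     def canBeat(kenPrefix):
--         rem = kenPrefix[::-1]
--         for v in reversed(naomiNums):
--             if rem and v >= rem[0]:
--                 rem = rem[1:]
--         return not rem
--
--     lo, hi = 0, len(kenNums)
--     while lo < hi:
--         mid = (lo + hi + 1) // 2
--         if canBeat(kenNums[:mid]):
--             lo = mid
--         else:
--             hi = mid - 1
--     return lo
-- ===== Notes on version B (the rewrite author's own statement) =====
-- stated objective: alternative
-- what changed: Replaces A's forward two-pointer greedy with a binary search over the answer (the longest beatable prefix of kenNums), each candidate prefix checked by a backward greedy feasibility pass; correct because the match count of the forward greedy equals the largest m such that ken's m-prefix embeds dominated into naomi, and that feasibility is monotone in m.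
import Mathlib
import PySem

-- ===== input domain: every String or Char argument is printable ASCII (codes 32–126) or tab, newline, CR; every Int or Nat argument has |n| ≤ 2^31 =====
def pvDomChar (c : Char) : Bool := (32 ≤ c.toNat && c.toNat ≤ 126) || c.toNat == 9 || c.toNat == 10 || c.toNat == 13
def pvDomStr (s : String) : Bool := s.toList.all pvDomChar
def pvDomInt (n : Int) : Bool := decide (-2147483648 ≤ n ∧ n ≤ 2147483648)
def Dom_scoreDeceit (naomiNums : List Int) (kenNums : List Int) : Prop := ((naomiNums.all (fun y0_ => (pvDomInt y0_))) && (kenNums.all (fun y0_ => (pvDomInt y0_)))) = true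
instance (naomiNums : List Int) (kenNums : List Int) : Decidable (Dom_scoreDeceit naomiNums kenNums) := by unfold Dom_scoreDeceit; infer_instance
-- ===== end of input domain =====

-- B replaces A's forward two-pointer greedy by a binary search over the answer with a
-- backward-greedy feasibility check per candidate prefix (alternative algorithm, not faster).

-- ===== PORT A =====
-- A's nested while loops as one well-founded recursion on the two indices:
-- the naomi-advancing branch is the inner skip-while step, the rest the outer loop body.
def scoreDeceitLoop (naomiNums kenNums : List Int) (naomiInd kenInd : Nat) : Nat :=
  if hk : kenInd < kenNums.length then
    if hn : naomiInd < naomiNums.length then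
      if naomiNums[naomiInd] < kenNums[kenInd] then
        scoreDeceitLoop naomiNums kenNums (naomiInd + 1) kenInd
      else
        scoreDeceitLoop naomiNums kenNums (naomiInd + 1) (kenInd + 1)
    else kenInd
  else kenInd
termination_by (naomiNums.length - naomiInd) + (kenNums.length - kenInd)
decreasing_by
  · omega
  · omega

def scoreDeceit (naomiNums : List Int) (kenNums : List Int) : Int :=
  (scoreDeceitLoop naomiNums kenNums 0 0 : Int)

-- ===== PORT B =====
-- canBeat's loop: `rem = kenPrefix[::-1]; for v in reversed(naomiNums): if rem and v >= rem[0]: rem = rem[1:]`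
-- (rem[1:] on a nonempty list is its tail; second argument is reversed(naomiNums))
def canBeatGo (rem : List Int) : List Int → List Int
  | [] => rem
  | v :: vs =>
    match rem with
    | [] => canBeatGo [] vs
    | k :: kt => if k ≤ v then canBeatGo kt vs else canBeatGo (k :: kt) vs

-- `return not rem` after the loop
def canBeat (naomiNums kenPrefix : List Int) : Bool :=
  canBeatGo kenPrefix.reverse naomiNums.reverse == []

-- the `while lo < hi` binary search (lo, hi stay nonnegative Python ints; mid ≥ 1 whenever hi is decreased)
def bsearchLoop (naomiNums kenNums : List Int) (lo hi : Nat) : Nat :=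
  if h : lo < hi then
    let mid := (lo + hi + 1) / 2
    if canBeat naomiNums (kenNums.take mid) then bsearchLoop naomiNums kenNums mid hi
    else bsearchLoop naomiNums kenNums lo (mid - 1)
  else lo
termination_by hi - lo
decreasing_by
  · omega
  · omega

def scoreDeceit_alt (naomiNums : List Int) (kenNums : List Int) : Int :=
  (bsearchLoop naomiNums kenNums 0 kenNums.length : Int)

-- ===== PRECONDITION & SPEC =====
def Spec_scoreDeceit (naomiNums : List Int) (kenNums : List Int) (out : Int) : Prop := out = scoreDeceit_alt naomiNums kenNums
instance (naomiNums : List Int) (kenNums : List Int) (out : Int) : Decidable (Spec_scoreDeceit naomiNums kenNums out) := by unfold Spec_scoreDeceit; infer_instance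

-- ===== CLAIM (what is proved, stated in full; the proofs are below) =====
def Claim_equal_scoreDeceit : Prop := ∀ (naomiNums : List Int) (kenNums : List Int), Dom_scoreDeceit naomiNums kenNums → Spec_scoreDeceit naomiNums kenNums (scoreDeceit naomiNums kenNums)

-- ===== LEMMAS AND PROOFS =====

-- the forward greedy match count, list-structural (reference function both ports are reduced to)
def fwd : List Int → List Int → Nat
  | [], _ => 0
  | v :: vs, ks =>
    match ks with
    | [] => 0
    | k :: kt => if k ≤ v then fwd vs kt + 1 else fwd vs (k :: kt)

theorem fwd_nil (ns : List Int) : fwd ns [] = 0 := by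
  cases ns <;> simp [fwd]

theorem fwd_le (ns ks : List Int) : fwd ns ks ≤ ks.length := by
  induction ns generalizing ks with
  | nil => simp [fwd]
  | cons v vs ih =>
    cases ks with
    | nil => simp [fwd]
    | cons k kt =>
      simp only [fwd]
      split
      · have := ih kt; simp; omega
      · have := ih (k :: kt); simpa using this

-- PORT A equals fwd
theorem loopA_eq_fwd (naomiNums kenNums : List Int) (naomiInd kenInd : Nat) :
    scoreDeceitLoop naomiNums kenNums naomiInd kenInd
      = kenInd + fwd (naomiNums.drop naomiInd) (kenNums.drop kenInd) := by
  induction naomiInd, kenInd using scoreDeceitLoop.induct (naomiNums := naomiNums) (kenNums := kenNums) with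
  | case1 ni ki hk hn hlt ih =>
    rw [scoreDeceitLoop]
    simp only [dif_pos hk, dif_pos hn, if_pos hlt]
    rw [ih, List.drop_eq_getElem_cons hn, List.drop_eq_getElem_cons hk]
    simp only [fwd, if_neg (by omega : ¬ kenNums[ki] ≤ naomiNums[ni])]
  | case2 ni ki hk hn hge ih =>
    rw [scoreDeceitLoop]
    simp only [dif_pos hk, dif_pos hn, if_neg hge]
    rw [ih, List.drop_eq_getElem_cons hn, List.drop_eq_getElem_cons hk]
    simp only [fwd, if_pos (by omega : kenNums[ki] ≤ naomiNums[ni])]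
    omega
  | case3 ni ki hk hn =>
    rw [scoreDeceitLoop]
    simp only [dif_pos hk, dif_neg hn]
    simp [List.drop_eq_nil_of_le (show naomiNums.length ≤ ni by omega), fwd]
  | case4 ni ki hk =>
    rw [scoreDeceitLoop, dif_neg hk]
    simp [List.drop_eq_nil_of_le (show kenNums.length ≤ ki by omega), fwd_nil]

-- canBeat's loop leaves exactly the part of rem the forward greedy does not match
theorem canBeatGo_eq_drop (vs ks : List Int) : canBeatGo ks vs = ks.drop (fwd vs ks) := by
  induction vs generalizing ks with
  | nil => simp [canBeatGo, fwd]
  | cons v vs ih =>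
    cases ks with
    | nil => simp [canBeatGo, fwd, ih]
    | cons k kt =>
      simp only [canBeatGo, fwd]
      split
      · rw [ih kt]; rfl
      · rw [ih (k :: kt)]

-- domination: ks can be matched, in order, by ≥ elements of ns
inductive DomRel : List Int → List Int → Prop
  | nil (ns : List Int) : DomRel ns []
  | skip {ns ks : List Int} {n : Int} : DomRel ns ks → DomRel (n :: ns) ks
  | take {ns ks : List Int} {n k : Int} : k ≤ n → DomRel ns ks → DomRel (n :: ns) (k :: ks)

theorem domRel_tail {ns ks : List Int} (h : DomRel ns ks) : DomRel ns ks.tail := by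
  induction h with
  | nil => exact DomRel.nil _
  | skip _ ih => exact DomRel.skip ih
  | take hk h _ => exact DomRel.skip h

theorem domRel_take {ns ks : List Int} (h : DomRel ns ks) (m : Nat) : DomRel ns (ks.take m) := by
  induction h generalizing m with
  | nil => simp [DomRel.nil]
  | skip _ ih => exact DomRel.skip (ih m)
  | take hk _ ih =>
    cases m with
    | zero => exact DomRel.nil _
    | succ m => exact DomRel.take hk (ih m)

theorem fwd_of_domRel {ns ks : List Int} (h : DomRel ns ks) : fwd ns ks = ks.length := by
  induction ns generalizing ks with
  | nil =>
    cases h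
    simp [fwd]
  | cons v vs ih =>
    cases ks with
    | nil => simp [fwd]
    | cons k kt =>
      simp only [fwd]
      split
      · have hkt : DomRel vs kt := by
          cases h with
          | skip h' => exact domRel_tail h'
          | take _ h' => exact h'
        rw [ih hkt]; simp
      · rename_i hlt
        have h' : DomRel vs (k :: kt) := by
          cases h with
          | skip h' => exact h'
          | take hk _ => exact absurd hk hlt
        exact ih h'

theorem domRel_fwd (ns ks : List Int) : DomRel ns (ks.take (fwd ns ks)) := by
  induction ns generalizing ks with
  | nil => simpa [fwd] using DomRel.nil ([] : List Int)
  | cons v vs ih =>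
    cases ks with
    | nil => simpa [fwd] using DomRel.nil (v :: vs)
    | cons k kt =>
      simp only [fwd]
      split
      · rename_i hk
        simpa [List.take] using DomRel.take hk (ih kt)
      · exact DomRel.skip (ih (k :: kt))

theorem fwd_take (ns ks : List Int) (m : Nat) : fwd ns (ks.take m) = min (fwd ns ks) m := by
  induction ns generalizing ks m with
  | nil => simp [fwd]
  | cons v vs ih =>
    cases ks with
    | nil => simp [fwd]
    | cons k kt =>
      cases m with
      | zero => simp [fwd_nil]
      | succ m =>
        simp only [List.take, fwd]
        split
        · rw [ih kt m]; omega
        · rw [← List.take, ih (k :: kt) (m + 1)]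

theorem domRel_append_skip {ns ks : List Int} (n : Int) (h : DomRel ns ks) :
    DomRel (ns ++ [n]) ks := by
  induction h with
  | nil => exact DomRel.nil _
  | skip _ ih => exact DomRel.skip ih
  | take hk _ ih => exact DomRel.take hk ih

theorem domRel_single {k n : Int} (hk : k ≤ n) (ns : List Int) : DomRel (ns ++ [n]) [k] := by
  induction ns with
  | nil => exact DomRel.take hk (DomRel.nil _)
  | cons m ms ih => exact DomRel.skip ih

theorem domRel_append_take {ns ks : List Int} {n k : Int} (hk : k ≤ n) (h : DomRel ns ks) :
    DomRel (ns ++ [n]) (ks ++ [k]) := by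
  induction h with
  | nil => exact domRel_single hk _
  | skip _ ih => exact DomRel.skip ih
  | take hk' _ ih => exact DomRel.take hk' ih

theorem domRel_reverse {ns ks : List Int} (h : DomRel ns ks) : DomRel ns.reverse ks.reverse := by
  induction h with
  | nil => exact DomRel.nil _
  | skip _ ih => simpa using domRel_append_skip _ ih
  | take hk _ ih => simpa using domRel_append_take hk ih

theorem domRel_of_reverse {ns ks : List Int} (h : DomRel ns.reverse ks.reverse) : DomRel ns ks := by
  simpa using domRel_reverse h

theorem fwd_eq_length_iff (ns ks : List Int) : fwd ns ks = ks.length ↔ DomRel ns ks := by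
  constructor
  · intro h
    have := domRel_fwd ns ks
    rwa [h, List.take_length] at this
  · exact fwd_of_domRel

theorem canBeat_iff (ns q : List Int) : canBeat ns q = true ↔ DomRel ns q := by
  unfold canBeat
  rw [canBeatGo_eq_drop, beq_iff_eq, List.drop_eq_nil_iff]
  have hle := fwd_le ns.reverse q.reverse
  constructor
  · intro h
    have : fwd ns.reverse q.reverse = q.reverse.length := by omega
    exact domRel_of_reverse ((fwd_eq_length_iff _ _).1 this)
  · intro h
    have := (fwd_eq_length_iff ns.reverse q.reverse).2 (domRel_reverse h)
    omega

theorem canBeat_take_iff (ns ks : List Int) (m : Nat) (hm : m ≤ ks.length) :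
    canBeat ns (ks.take m) = true ↔ m ≤ fwd ns ks := by
  rw [canBeat_iff]
  constructor
  · intro h
    have := fwd_of_domRel h
    rw [fwd_take, List.length_take] at this
    omega
  · intro h
    have h1 := domRel_take (domRel_fwd ns ks) m
    rwa [List.take_take, min_eq_left h] at h1

theorem bsearchLoop_aux (ns ks : List Int) (d : Nat) : ∀ lo hi : Nat, hi - lo ≤ d →
    lo ≤ fwd ns ks → fwd ns ks ≤ hi → hi ≤ ks.length →
    bsearchLoop ns ks lo hi = fwd ns ks := by
  induction d with
  | zero =>
    intro lo hi hd hlo hhi hN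
    rw [bsearchLoop, dif_neg (by omega : ¬ lo < hi)]
    omega
  | succ d ih =>
    intro lo hi hd hlo hhi hN
    rw [bsearchLoop]
    by_cases h : lo < hi
    · rw [dif_pos h]
      show (if canBeat ns (ks.take ((lo + hi + 1) / 2))
          then bsearchLoop ns ks ((lo + hi + 1) / 2) hi
          else bsearchLoop ns ks lo ((lo + hi + 1) / 2 - 1)) = fwd ns ks
      have hlomid : lo < (lo + hi + 1) / 2 := by omega
      have hmidhi : (lo + hi + 1) / 2 ≤ hi := by omega
      split_ifs with hcb
      · have := (canBeat_take_iff ns ks ((lo + hi + 1) / 2) (by omega)).1 hcb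
        exact ih _ _ (by omega) this hhi hN
      · have hgt : ¬ (lo + hi + 1) / 2 ≤ fwd ns ks := fun hle =>
          hcb ((canBeat_take_iff ns ks ((lo + hi + 1) / 2) (by omega)).2 hle)
        exact ih _ _ (by omega) hlo (by omega) (by omega)
    · rw [dif_neg h]
      omega

theorem bsearchLoop_eq_fwd (ns ks : List Int) :
    bsearchLoop ns ks 0 ks.length = fwd ns ks :=
  bsearchLoop_aux ns ks ks.length 0 ks.length (by omega) (Nat.zero_le _) (fwd_le ns ks)
    (le_refl _)

-- ===== VERDICT (by name: the statement is the Claim_ definition above) =====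
theorem scoreDeceit_spec : Claim_equal_scoreDeceit := by
  intro naomiNums kenNums _
  unfold Spec_scoreDeceit scoreDeceit scoreDeceit_alt
  rw [loopA_eq_fwd, List.drop_zero, List.drop_zero, bsearchLoop_eq_fwd]
  simp
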